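-- pv_equiv track=rewrite | github.com/foozzi/yaudio | src/helpers/search.py | extends_length
-- ===== SOURCE A (Python) =====
-- def extends_length(length, limit):
--     """
--     Return True if length more than limit
--     """
--     try:
--         metrics = [int(i.strip()) for i in length.split(':')]
--         secs = 0
--         for metric in metrics:
--             secs = 60 * secs + metric
--         return (secs > limit)
--     except Exception:
--         return True
-- ===== SOURCE B (Python) =====
-- def extends_length(length, limit):
--     """
--     Return True if length more than limit
--     """
--     try:
--         secs = 0
--         weight = 1
--         for part in reversed(length.split(':')):
--             secs += int(part.strip()) * weight
--             weight *= 60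
--         return secs > limit
--     except Exception:
--         return True
-- ===== Notes on version B (the rewrite author's own statement) =====
-- stated objective: alternative
-- what changed: Instead of building a list of ints and Horner-accumulating left-to-right, B makes a single right-to-left pass over the split parts, parsing each part inside the loop and adding it with a running power-of-60 weight accumulator.
import Mathlib
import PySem

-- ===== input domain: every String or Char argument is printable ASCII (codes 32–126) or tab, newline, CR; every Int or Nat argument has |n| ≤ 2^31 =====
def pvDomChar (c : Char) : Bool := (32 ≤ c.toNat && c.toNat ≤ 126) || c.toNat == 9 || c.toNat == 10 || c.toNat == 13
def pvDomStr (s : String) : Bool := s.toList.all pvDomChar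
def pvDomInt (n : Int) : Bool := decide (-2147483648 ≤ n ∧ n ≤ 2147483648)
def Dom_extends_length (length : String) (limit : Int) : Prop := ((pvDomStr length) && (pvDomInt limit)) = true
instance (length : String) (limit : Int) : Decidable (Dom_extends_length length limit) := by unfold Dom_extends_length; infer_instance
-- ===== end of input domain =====

-- B replaces A's list-of-ints + Horner loop with a single right-to-left pass that parses
-- each part inside the loop and keeps a running power-of-60 weight (alternative decomposition, same cost).

-- ===== PORT A =====
-- metrics = [int(i.strip()) for i in length.split(':')]; int() may raise → Option via mapM
def extends_length (length : String) (limit : Int) : Bool :=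
  match (PySem.Chars.splitOn length.toList [':']).mapM
      (fun i => PySem.Int.ofChars? (PySem.Chars.strip i)) with
  | none => true      -- except Exception: return True
  | some metrics =>
      let secs := metrics.foldl (fun secs metric => 60 * secs + metric) 0
      decide (secs > limit)

-- ===== PORT B =====
-- for part in reversed(length.split(':')): secs += int(part.strip()) * weight; weight *= 60
-- State (secs, weight) threaded through an Option fold: int() raising inside the loop → none.
def extends_length_alt (length : String) (limit : Int) : Bool :=
  match (PySem.Chars.splitOn length.toList [':']).reverse.foldlM
      (fun (st : Int × Int) part =>
        (PySem.Int.ofChars? (PySem.Chars.strip part)).map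
          (fun v => (st.1 + v * st.2, st.2 * 60)))
      ((0 : Int), (1 : Int)) with
  | none => true      -- except Exception: return True
  | some st => decide (st.1 > limit)

-- ===== PRECONDITION & SPEC =====
def Spec_extends_length (length : String) (limit : Int) (out : Bool) : Prop := out = extends_length_alt length limit
instance (length : String) (limit : Int) (out : Bool) : Decidable (Spec_extends_length length limit out) := by unfold Spec_extends_length; infer_instance

-- ===== CLAIM (what is proved, stated in full; the proofs are below) =====
def Claim_equal_extends_length : Prop := ∀ (length : String) (limit : Int), Dom_extends_length length limit → Spec_extends_length length limit (extends_length length limit)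

-- ===== LEMMAS AND PROOFS =====

-- B's monadic fold distributes over parsing: it is mapM followed by the pure pair fold.
theorem foldlM_eq_mapM_foldl (ps : List (List Char)) : ∀ (st : Int × Int),
    ps.foldlM
      (fun (st : Int × Int) part =>
        (PySem.Int.ofChars? (PySem.Chars.strip part)).map
          (fun v => (st.1 + v * st.2, st.2 * 60))) st =
    (ps.mapM (fun i => PySem.Int.ofChars? (PySem.Chars.strip i))).map
      (fun vs => vs.foldl (fun st v => (st.1 + v * st.2, st.2 * 60)) st) := by
  induction ps with
  | nil => intro st; rfl
  | cons p ps ih =>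
      intro st
      cases h : PySem.Int.ofChars? (PySem.Chars.strip p) with
      | none => simp [List.foldlM_cons, List.mapM_cons, h]
      | some v =>
          cases hm : ps.mapM (fun i => PySem.Int.ofChars? (PySem.Chars.strip i)) with
          | none => simp [List.foldlM_cons, List.mapM_cons, h, ih, hm]
          | some vs => simp [List.foldlM_cons, List.mapM_cons, h, ih, hm]

-- Horner with a nonzero accumulator, shifted.
theorem horner_shift (l : List Int) : ∀ (acc : Int),
    l.foldl (fun secs metric => 60 * secs + metric) acc =
      acc * 60 ^ l.length + l.foldl (fun secs metric => 60 * secs + metric) 0 := by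
  induction l with
  | nil => intro acc; simp
  | cons x xs ih =>
      intro acc
      rw [List.foldl_cons, List.foldl_cons, ih (60 * acc + x), ih (60 * 0 + x)]
      simp [pow_succ]
      ring

-- mapM over a reversed list, in the Option monad, is the reversed mapM.
theorem mapM_option_reverse (f : List Char → Option Int) (ps : List (List Char)) :
    ps.reverse.mapM f = (ps.mapM f).map List.reverse := by
  induction ps with
  | nil => rfl
  | cons p ps ih =>
      rw [List.reverse_cons, List.mapM_append, ih]
      cases h : ps.mapM f with
      | none => cases hp : f p <;> simp [List.mapM_cons, hp, h]
      | some vs =>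
          cases hp : f p with
          | none => simp [List.mapM_cons, hp, h]
          | some v => simp [List.mapM_cons, hp, h]

-- The reversed weighted fold computes the Horner value.
theorem weighted_rev_eq_horner (vs : List Int) : ∀ (s w : Int),
    vs.reverse.foldl (fun st v => (st.1 + v * st.2, st.2 * 60)) (s, w) =
      (s + w * vs.foldl (fun secs metric => 60 * secs + metric) 0, w * 60 ^ vs.length) := by
  induction vs with
  | nil => intro s w; simp
  | cons x xs ih =>
      intro s w
      rw [List.reverse_cons, List.foldl_append, ih s w]
      simp only [List.foldl_cons, List.foldl_nil, List.length_cons, Prod.mk.injEq]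
      rw [horner_shift xs (60 * 0 + x)]
      constructor
      · ring
      · ring

-- ===== VERDICT (by name: the statement is the Claim_ definition above) =====
theorem extends_length_spec : Claim_equal_extends_length := by
  intro length limit _
  unfold Spec_extends_length extends_length extends_length_alt
  rw [foldlM_eq_mapM_foldl, mapM_option_reverse]
  cases h : (PySem.Chars.splitOn length.toList [':']).mapM (fun i => PySem.Int.ofChars? (PySem.Chars.strip i)) with
  | none => simp
  | some metrics =>
      simp only [Option.map_some, weighted_rev_eq_horner]
      norm_num
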